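-- pv_equiv track=rewrite | github.com/Yanzeyi/Hb_bridge | error_detect.py | peak_find
-- ===== SOURCE A (Python) =====
-- def peak_find(SLdata_list, point, direction):
--     close_point = -1 if direction == 0 else 1
--     cnt = -2 if direction == 0 else 2
--     if point + close_point <= len(SLdata_list) - 1 and point + close_point >= 0:
--         diff = SLdata_list[point + close_point] - SLdata_list[point]
--         while(1):
--             if point + cnt <= len(SLdata_list) - 1 and point + cnt >= 0:
--                 temp = SLdata_list[point + cnt] - SLdata_list[point + cnt - close_point]
--                 cnt += close_point
--                 if diff * temp > 0:
--                     diff += temp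
--                 else:
--                     break
--             else:
--                 break
--         return diff
--     return None
-- ===== SOURCE B (Python) =====
-- def peak_find(SLdata_list, point, direction):
--     n = len(SLdata_list)
--     if direction == 0:
--         if not (0 <= point - 1 <= n - 1):
--             return None
--         first = SLdata_list[point - 1] - SLdata_list[point]
--         tail = [SLdata_list[i] - SLdata_list[i + 1] for i in range(point - 2, -1, -1)]
--     else:
--         if not (0 <= point + 1 <= n - 1):
--             return None
--         first = SLdata_list[point + 1] - SLdata_list[point]
--         tail = [SLdata_list[i] - SLdata_list[i - 1] for i in range(point + 2, n)]
--     cut = next((k for k, d in enumerate(tail) if d * first <= 0), len(tail))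
--     return first + sum(tail[:cut])
-- ===== Notes on version B (the rewrite author's own statement) =====
-- stated objective: alternative
-- what changed: B replaces A's fused while-loop with a running-sum accumulator and in-loop sign test by staged passes: it materialises the list of consecutive differences along the direction with a comprehension, finds the first index whose difference does not share the sign of the first step with next(enumerate(...)), and returns first + sum of that prefix.
import Mathlib
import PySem

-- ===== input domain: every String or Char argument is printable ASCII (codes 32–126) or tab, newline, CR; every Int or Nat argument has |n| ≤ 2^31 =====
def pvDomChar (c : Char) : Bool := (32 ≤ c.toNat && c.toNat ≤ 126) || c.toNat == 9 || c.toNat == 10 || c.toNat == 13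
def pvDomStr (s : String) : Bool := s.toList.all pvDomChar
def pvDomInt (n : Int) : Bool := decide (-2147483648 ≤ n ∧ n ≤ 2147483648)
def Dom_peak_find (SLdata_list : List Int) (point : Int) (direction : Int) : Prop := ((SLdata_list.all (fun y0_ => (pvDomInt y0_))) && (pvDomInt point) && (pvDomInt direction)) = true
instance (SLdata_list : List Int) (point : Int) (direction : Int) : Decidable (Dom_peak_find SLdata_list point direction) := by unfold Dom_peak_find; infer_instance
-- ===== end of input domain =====

-- B replaces A's fused walk-with-running-sum by staged passes: it materialises the list of
-- consecutive differences along the direction, finds the first index whose difference no longer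
-- matches the sign of the first step, and returns first + sum of that prefix (alternative decomposition, same cost).


-- shared indexing shorthand: xs[i] under a guard that guarantees it is in range (pyGet? wraps negatives exactly like Python)
def pvGet (xs : List Int) (i : Int) : Int := (PySem.List.pyGet? xs i).getD 0

-- ===== PORT A =====
-- A's while(1) loop: state (cnt, diff); fuel xs.length+1 exceeds the iteration count (point+cnt takes distinct in-range values)
def peakLoopA (xs : List Int) (point close : Int) : Int → Int → Nat → Int
  | _, diff, 0 => diff
  | cnt, diff, fuel+1 =>
    if point + cnt ≤ (xs.length : Int) - 1 ∧ 0 ≤ point + cnt then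
      let temp := pvGet xs (point + cnt) - pvGet xs (point + cnt - close)
      if diff * temp > 0 then peakLoopA xs point close (cnt + close) (diff + temp) fuel
      else diff
    else diff

def peak_find (SLdata_list : List Int) (point : Int) (direction : Int) : Option Int :=
  let close : Int := if direction = 0 then -1 else 1
  let cnt : Int := if direction = 0 then -2 else 2
  if point + close ≤ (SLdata_list.length : Int) - 1 ∧ 0 ≤ point + close then
    match PySem.List.pyGet? SLdata_list point with
    | none => none  -- Python raises IndexError here; excluded by Pre_peak_find
    | some base =>
      some (peakLoopA SLdata_list point close cnt (pvGet SLdata_list (point + close) - base)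
              (SLdata_list.length + 1))
  else none

-- ===== PORT B =====
-- B's cutoff: next((k for k, d in enumerate(tail) if d * first <= 0), len(tail))
def pvCut (first : Int) : List Int → Nat
  | [] => 0
  | d :: ds => if d * first ≤ 0 then 0 else pvCut first ds + 1

def peak_find_alt (SLdata_list : List Int) (point : Int) (direction : Int) : Option Int :=
  let n : Int := (SLdata_list.length : Int)
  if direction = 0 then
    if 0 ≤ point - 1 ∧ point - 1 ≤ n - 1 then
      match PySem.List.pyGet? SLdata_list point with
      | none => none  -- Python raises IndexError here; excluded by Pre_peak_find
      | some base =>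
        let first := pvGet SLdata_list (point - 1) - base
        let tail := (PySem.List.pyRange (point - 2) (-1) (-1)).map
          (fun i => pvGet SLdata_list i - pvGet SLdata_list (i + 1))
        some (first + (tail.take (pvCut first tail)).sum)
    else none
  else
    if 0 ≤ point + 1 ∧ point + 1 ≤ n - 1 then
      match PySem.List.pyGet? SLdata_list point with
      | none => none  -- Python raises IndexError here; excluded by Pre_peak_find
      | some base =>
        let first := pvGet SLdata_list (point + 1) - base
        let tail := (PySem.List.pyRange (point + 2) n 1).map
          (fun i => pvGet SLdata_list i - pvGet SLdata_list (i - 1))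
        some (first + (tail.take (pvCut first tail)).sum)
    else none

-- ===== PRECONDITION & SPEC =====
-- Pre_ excludes exactly the inputs where the Python A raises IndexError: the first neighbour
-- point±1 is in range but point itself is outside Python's valid index range [-len, len-1].
def Pre_peak_find (SLdata_list : List Int) (point : Int) (direction : Int) : Prop :=
  let s : Int := if direction = 0 then -1 else 1
  (0 ≤ point + s ∧ point + s ≤ (SLdata_list.length : Int) - 1) →
    (-(SLdata_list.length : Int) ≤ point ∧ point < (SLdata_list.length : Int))
instance (SLdata_list : List Int) (point : Int) (direction : Int) : Decidable (Pre_peak_find SLdata_list point direction) := by unfold Pre_peak_find; infer_instance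

def pvWitness_peak_find : List Int × Int × Int := ([1, 3, 6, 5], 0, 1)

def Spec_peak_find (SLdata_list : List Int) (point : Int) (direction : Int) (out : Option Int) : Prop := out = peak_find_alt SLdata_list point direction
instance (SLdata_list : List Int) (point : Int) (direction : Int) (out : Option Int) : Decidable (Spec_peak_find SLdata_list point direction out) := by unfold Spec_peak_find; infer_instance

-- ===== CLAIM (what is proved, stated in full; the proofs are below) =====
def Claim_equal_peak_find : Prop := ∀ (SLdata_list : List Int) (point : Int) (direction : Int), Dom_peak_find SLdata_list point direction → Pre_peak_find SLdata_list point direction → Spec_peak_find SLdata_list point direction (peak_find SLdata_list point direction)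

-- ===== LEMMAS AND PROOFS =====

-- A's loop as a fold-with-break over an explicit list of consecutive differences
def loopL : Int → List Int → Int
  | diff, [] => diff
  | diff, t :: ts => if diff * t > 0 then loopL (diff + t) ts else diff

-- with diff and first of the same sign, testing t against diff is testing t against first
lemma pv_sign_trans {d f t : Int} (h : d * f > 0) : (d * t > 0) ↔ (t * f > 0) := by
  constructor <;> intro h2 <;> nlinarith [sq_nonneg d, sq_nonneg f, mul_pos h h2]

-- the break-fold equals first + sum of the prefix before the cutoff, while diff keeps first's sign
lemma pv_loopL_pos (first : Int) :
    ∀ (tail : List Int) (diff : Int), diff * first > 0 →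
      loopL diff tail = diff + (tail.take (pvCut first tail)).sum := by
  intro tail
  induction tail with
  | nil => intro diff _; simp [loopL, pvCut]
  | cons t ts ih =>
    intro diff hs
    rw [loopL, pvCut]
    by_cases ht : t * first ≤ 0
    · rw [if_pos ht, if_neg (by have := pv_sign_trans (t := t) hs; omega)]
      simp
    · have ht' : t * first > 0 := by omega
      rw [if_neg ht, if_pos ((pv_sign_trans hs).mpr ht')]
      rw [ih (diff + t) (by nlinarith)]
      simp [List.take_succ_cons]
      ring
  
-- with a zero first difference both sides stop immediately
lemma pv_loopL_zero (tail : List Int) : loopL 0 tail = 0 + (tail.take (pvCut 0 tail)).sum := by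
  cases tail with
  | nil => simp [loopL, pvCut]
  | cons t ts => simp [loopL, pvCut]

lemma pv_loopL_first (first : Int) (tail : List Int) :
    loopL first tail = first + (tail.take (pvCut first tail)).sum := by
  by_cases h : first = 0
  · subst h; exact pv_loopL_zero tail
  · exact pv_loopL_pos first tail first (mul_self_pos.mpr h)

-- A's upward walk (close = 1) is the break-fold over the differences at indices a, a+1, …, n-1
lemma pv_bridge_up (xs : List Int) (point : Int) :
    ∀ (fuel : Nat) (a diff : Int), 0 ≤ a → (xs.length : Int) - a ≤ (fuel : Int) →
      peakLoopA xs point 1 (a - point) diff fuel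
        = loopL diff ((PySem.List.pyRange a (xs.length : Int) 1).map
            (fun i => pvGet xs i - pvGet xs (i - 1))) := by
  intro fuel
  induction fuel with
  | zero =>
    intro a diff ha hf
    rw [PySem.List.pyRange_one_eq_nil (by exact_mod_cast by omega)]
    simp [peakLoopA, loopL]
  | succ f ih =>
    intro a diff ha hf
    rw [peakLoopA]
    simp only [show point + (a - point) = a from by ring]
    by_cases hlt : a < (xs.length : Int)
    · rw [PySem.List.pyRange_one_cons hlt, List.map_cons, loopL]
      rw [if_pos ⟨by omega, ha⟩]
      by_cases hc : diff * (pvGet xs a - pvGet xs (a - 1)) > 0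
      · rw [if_pos hc, if_pos hc, show a - point + 1 = (a + 1) - point from by ring]
        exact ih (a + 1) _ (by omega) (by push_cast at hf ⊢; omega)
      · rw [if_neg hc, if_neg hc]
    · rw [if_neg (by omega), PySem.List.pyRange_one_eq_nil (by omega)]
      simp [loopL]

-- A's downward walk (close = -1) is the break-fold over the differences at indices a, a-1, …, 0
lemma pv_bridge_down (xs : List Int) (point : Int) :
    ∀ (fuel : Nat) (a diff : Int), a ≤ (xs.length : Int) - 1 → a + 1 ≤ (fuel : Int) →
      peakLoopA xs point (-1) (a - point) diff fuel
        = loopL diff ((PySem.List.pyRange a (-1) (-1)).map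
            (fun i => pvGet xs i - pvGet xs (i + 1))) := by
  intro fuel
  induction fuel with
  | zero =>
    intro a diff ha hf
    rw [PySem.List.pyRange_neg_one_eq_nil (by omega)]
    simp [peakLoopA, loopL]
  | succ f ih =>
    intro a diff ha hf
    rw [peakLoopA]
    simp only [show point + (a - point) = a from by ring]
    by_cases hnn : 0 ≤ a
    · rw [PySem.List.pyRange_neg_one_cons (by omega), List.map_cons, loopL]
      rw [if_pos ⟨ha, hnn⟩]
      simp only [show a - -1 = a + 1 from by ring]
      by_cases hc : diff * (pvGet xs a - pvGet xs (a + 1)) > 0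
      · rw [if_pos hc, if_pos hc, show a - point + -1 = (a - 1) - point from by ring]
        exact ih (a - 1) _ (by omega) (by push_cast at hf ⊢; omega)
      · rw [if_neg hc, if_neg hc]
    · rw [if_neg (by omega), PySem.List.pyRange_neg_one_eq_nil (by omega)]
      simp [loopL]

-- ===== VERDICT (by name: the statement is the Claim_ definition above) =====
theorem peak_find_spec : Claim_equal_peak_find := by
  intro xs point direction _ _
  unfold Spec_peak_find peak_find peak_find_alt
  by_cases h0 : direction = 0
  · simp only [h0, reduceIte]
    by_cases hg : point + -1 ≤ (xs.length : Int) - 1 ∧ 0 ≤ point + -1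
    · rw [if_pos hg, if_pos (by omega)]
      cases hbase : PySem.List.pyGet? xs point with
      | none => rfl
      | some base =>
        simp only
        rw [show point + -1 = point - 1 from by ring,
            show (-2 : Int) = (point - 2) - point from by ring,
            pv_bridge_down xs point (xs.length + 1) (point - 2) _ (by omega) (by push_cast; omega),
            pv_loopL_first]
    · rw [if_neg hg, if_neg (by omega)]
  · simp only [if_neg h0]
    by_cases hg : point + 1 ≤ (xs.length : Int) - 1 ∧ 0 ≤ point + 1
    · rw [if_pos hg, if_pos (by omega)]
      cases hbase : PySem.List.pyGet? xs point with
      | none => rfl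
      | some base =>
        simp only
        rw [show (2 : Int) = (point + 2) - point from by ring,
            pv_bridge_up xs point (xs.length + 1) (point + 2) _ (by omega) (by push_cast; omega),
            pv_loopL_first]
        ring_nf
    · rw [if_neg hg, if_neg (by omega)]
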